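-- pv_equiv track=rewrite | github.com/VincentLepetit/VincentLepetit.github.io | files/bibfile_cleaner.py | remove_duplicate_string_entries
-- ===== SOURCE A (Python) =====
-- def remove_duplicate_string_entries(string_entries):
--     cleaned_entries_dict = dict()
--     for s in string_entries:
--         if s["string_name"] not in cleaned_entries_dict:
--             cleaned_entries_dict.update({s["string_name"]: s["string_value"]})
--         else:
--             if len(cleaned_entries_dict[s["string_name"]]) < len(s["string_value"]):
--                 cleaned_entries_dict[s["string_name"]] = s["string_value"]
--
--     cleaned_entries = []
--     for sd in cleaned_entries_dict:
--         s = dict()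
--         s.update({"entry_type": "string"})
--         s.update({"string_name": sd})
--         s.update({"string_value": cleaned_entries_dict[sd]})
--         cleaned_entries.append(s)
--     return cleaned_entries
-- ===== SOURCE B (Python) =====
-- def remove_duplicate_string_entries(string_entries):
--     # For each distinct name (first-appearance order) rescan the whole input
--     # for its longest value; no dict of accumulated values is kept.
--     def longest_value(name):
--         best = ""
--         for s in string_entries:
--             if s["string_name"] == name and len(best) < len(s["string_value"]):
--                 best = s["string_value"]
--         return best
--
--     names = []
--     for s in string_entries:
--         if s["string_name"] not in names:
--             names.append(s["string_name"])
--
--     return [{"entry_type": "string", "string_name": n, "string_value": longest_value(n)}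
--             for n in names]
-- ===== Notes on version B (the rewrite author's own statement) =====
-- stated objective: alternative
-- what changed: Replaces A's single-pass dict accumulation (name->longest value, then rebuild) with a dict-free quadratic scheme: collect the distinct names in first-appearance order into a list, then for each name rescan the whole input to find its longest value.
import Mathlib
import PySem

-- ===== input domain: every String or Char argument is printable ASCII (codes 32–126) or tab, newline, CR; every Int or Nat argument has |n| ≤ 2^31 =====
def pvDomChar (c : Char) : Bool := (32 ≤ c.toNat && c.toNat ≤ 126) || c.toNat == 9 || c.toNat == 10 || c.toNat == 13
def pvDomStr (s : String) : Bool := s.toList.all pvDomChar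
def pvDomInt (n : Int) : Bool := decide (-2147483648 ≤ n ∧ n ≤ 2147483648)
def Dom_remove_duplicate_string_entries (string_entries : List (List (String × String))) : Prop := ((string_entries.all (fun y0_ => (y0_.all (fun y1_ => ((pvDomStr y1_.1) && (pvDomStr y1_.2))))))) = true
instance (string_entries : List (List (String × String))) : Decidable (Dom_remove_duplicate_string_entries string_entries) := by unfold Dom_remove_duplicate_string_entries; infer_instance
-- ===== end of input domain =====

-- B is a dict-free alternative: it collects the distinct names in first-appearance
-- order into a list, then rescans the whole input per name for its longest value
-- (quadratic, no accumulated name->value dict; objective: alternative).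

-- ===== PORT A =====
-- first loop body of A: accumulate name -> longest value in an insertion-ordered dict
def pvStepA (d : PySem.Dict String String) (s : List (String × String)) : PySem.Dict String String :=
  if d.contains ((PySem.Dict.mk s).getD "string_name" "") = false then
    d.insert ((PySem.Dict.mk s).getD "string_name" "") ((PySem.Dict.mk s).getD "string_value" "")
  else if PySem.Str.len (d.getD ((PySem.Dict.mk s).getD "string_name" "") "")
      < PySem.Str.len ((PySem.Dict.mk s).getD "string_value" "") then
    d.insert ((PySem.Dict.mk s).getD "string_name" "") ((PySem.Dict.mk s).getD "string_value" "")
  else d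

def remove_duplicate_string_entries (string_entries : List (List (String × String))) : List (List (String × String)) :=
  let cleaned_entries_dict := string_entries.foldl pvStepA PySem.Dict.empty
  -- second loop: for sd in cleaned_entries_dict, build a fresh dict by three updates
  cleaned_entries_dict.keys.foldl
    (fun cleaned sd =>
      cleaned ++ [((((PySem.Dict.empty).insert "entry_type" "string").insert "string_name" sd).insert
          "string_value" (cleaned_entries_dict.getD sd "")).items]) []

-- ===== PORT B =====
-- B's helper longest_value: scan the whole input, keep the strictly longest value for name
def pvLongest (string_entries : List (List (String × String))) (name : String) : String :=
  string_entries.foldl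
    (fun best s =>
      if ((PySem.Dict.mk s).getD "string_name" "" == name)
          && (PySem.Str.len best < PySem.Str.len ((PySem.Dict.mk s).getD "string_value" "")) then
        (PySem.Dict.mk s).getD "string_value" ""
      else best) ""

-- B's names loop: distinct names in first-appearance order
def pvNames (string_entries : List (List (String × String))) : List String :=
  string_entries.foldl
    (fun names s =>
      if names.contains ((PySem.Dict.mk s).getD "string_name" "") = false then
        names ++ [(PySem.Dict.mk s).getD "string_name" ""]
      else names) []

def remove_duplicate_string_entries_alt (string_entries : List (List (String × String))) : List (List (String × String)) :=
  (pvNames string_entries).map (fun n =>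
    [("entry_type", "string"), ("string_name", n), ("string_value", pvLongest string_entries n)])

-- ===== PRECONDITION & SPEC =====
-- Pre_ excludes exactly the inputs on which Python A raises KeyError: an entry missing
-- the "string_name" or "string_value" key.
def Pre_remove_duplicate_string_entries (string_entries : List (List (String × String))) : Prop :=
  ∀ s ∈ string_entries,
    (PySem.Dict.mk s).contains "string_name" = true ∧ (PySem.Dict.mk s).contains "string_value" = true
instance (string_entries : List (List (String × String))) : Decidable (Pre_remove_duplicate_string_entries string_entries) := by
  unfold Pre_remove_duplicate_string_entries; infer_instance

def pvWitness_remove_duplicate_string_entries : (List (List (String × String))) :=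
  [[("string_name", "a"), ("string_value", "x")], [("string_name", "a"), ("string_value", "yy")]]

def Spec_remove_duplicate_string_entries (string_entries : List (List (String × String))) (out : List (List (String × String))) : Prop := out = remove_duplicate_string_entries_alt string_entries
instance (string_entries : List (List (String × String))) (out : List (List (String × String))) : Decidable (Spec_remove_duplicate_string_entries string_entries out) := by unfold Spec_remove_duplicate_string_entries; infer_instance

-- ===== CLAIM (what is proved, stated in full; the proofs are below) =====
def Claim_equal_remove_duplicate_string_entries : Prop := ∀ (string_entries : List (List (String × String))), Dom_remove_duplicate_string_entries string_entries → Pre_remove_duplicate_string_entries string_entries → Spec_remove_duplicate_string_entries string_entries (remove_duplicate_string_entries string_entries)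

-- ===== LEMMAS AND PROOFS =====

-- the fresh 3-key dict both programs create for name k and value v
def pvMkE (k v : String) : List (String × String) :=
  [("entry_type", "string"), ("string_name", k), ("string_value", v)]

-- shorthand for the two field reads
def pvNm (s : List (String × String)) : String := (PySem.Dict.mk s).getD "string_name" ""
def pvVl (s : List (String × String)) : String := (PySem.Dict.mk s).getD "string_value" ""

theorem pvLongest_append (l : List (List (String × String))) (s : List (String × String)) (n : String) :
    pvLongest (l ++ [s]) n =
      (if (pvNm s == n) && (PySem.Str.len (pvLongest l n) < PySem.Str.len (pvVl s)) then pvVl s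
       else pvLongest l n) := by
  simp [pvLongest, List.foldl_append, pvNm, pvVl]

theorem pvNames_append (l : List (List (String × String))) (s : List (String × String)) :
    pvNames (l ++ [s]) =
      (if (pvNames l).contains (pvNm s) = false then pvNames l ++ [pvNm s] else pvNames l) := by
  simp [pvNames, List.foldl_append, pvNm]

-- if no entry of l has name n, the longest-value scan keeps its accumulator
theorem pvLongest_not_mem (l : List (List (String × String))) (n : String)
    (h : ∀ s ∈ l, pvNm s ≠ n) : pvLongest l n = "" := by
  have : ∀ b, l.foldl
      (fun best s =>
        if ((PySem.Dict.mk s).getD "string_name" "" == n)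
            && (PySem.Str.len best < PySem.Str.len ((PySem.Dict.mk s).getD "string_value" "")) then
          (PySem.Dict.mk s).getD "string_value" ""
        else best) b = b := by
    intro b
    induction l generalizing b with
    | nil => rfl
    | cons a t ih =>
      have ha : (pvNm a == n) = false := by
        simpa using h a (List.mem_cons_self)
      simp only [List.foldl_cons]
      rw [show ((PySem.Dict.mk a).getD "string_name" "" == n) = false from ha]
      simp only [Bool.false_and]
      exact ih (fun s hs => h s (List.mem_cons_of_mem _ hs)) b
  exact this ""

-- membership in pvNames is membership among the entries' names
theorem pvNames_mem (l : List (List (String × String))) (n : String) :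
    n ∈ pvNames l ↔ ∃ s ∈ l, pvNm s = n := by
  induction l using List.reverseRecOn with
  | nil => simp [pvNames]
  | append_singleton pre s ih =>
    rw [pvNames_append]
    by_cases hc : (pvNames pre).contains (pvNm s) = false
    · rw [if_pos hc]
      simp only [List.mem_append, List.mem_singleton, ih]
      constructor
      · rintro (⟨t, ht, he⟩ | he)
        · exact ⟨t, Or.inl ht, he⟩
        · exact ⟨s, Or.inr rfl, he.symm⟩
      · rintro ⟨t, ht | ht, he⟩
        · exact Or.inl ⟨t, ht, he⟩
        · subst ht; exact Or.inr he.symm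
    · rw [if_neg hc]
      have hm : pvNm s ∈ pvNames pre := by simpa using hc
      rw [ih]
      constructor
      · rintro ⟨t, ht, he⟩
        exact ⟨t, List.mem_append.mpr (Or.inl ht), he⟩
      · rintro ⟨t, ht, he⟩
        rcases List.mem_append.mp ht with h | h
        · exact ⟨t, h, he⟩
        · have hts : t = s := by simpa using h
          subst hts
          rw [he] at hm
          exact ih.mp hm

theorem pvNames_nodup (l : List (List (String × String))) : (pvNames l).Nodup := by
  induction l using List.reverseRecOn with
  | nil => simp [pvNames]
  | append_singleton pre s ih =>
    rw [pvNames_append]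
    by_cases hc : (pvNames pre).contains (pvNm s) = false
    · rw [if_pos hc]
      have hnm : pvNm s ∉ pvNames pre := by simpa using hc
      simp only [List.nodup_append, List.nodup_singleton, true_and]
      refine ⟨ih, ?_⟩
      intro a ha b hb hab
      have hbs : b = pvNm s := by simpa using hb
      exact hnm ((hab.trans hbs) ▸ ha)
    · rw [if_neg hc]; exact ih

-- main invariant: A's accumulated dict has exactly B's (names, longest) contents
theorem pv_items_spec (l : List (List (String × String))) :
    (l.foldl pvStepA PySem.Dict.empty).items
      = (pvNames l).map (fun n => (n, pvLongest l n)) := by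
  induction l using List.reverseRecOn with
  | nil => rfl
  | append_singleton pre s ih =>
    rw [List.foldl_append, List.foldl_cons, List.foldl_nil]
    set d := pre.foldl pvStepA PySem.Dict.empty with hd
    have hkeys : d.keys = pvNames pre := by
      have h0 : d.keys = d.items.map Prod.fst := rfl
      rw [h0, ih, List.map_map]
      exact List.map_id'' (fun n => rfl) _
    have hnodup : d.keys.Nodup := by rw [hkeys]; exact pvNames_nodup pre
    have hcontains : d.contains (pvNm s) = ((pvNames pre).contains (pvNm s)) := by
      rcases h : (pvNames pre).contains (pvNm s) with _ | _
      · simp only [Bool.eq_false_iff]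
        intro hc
        have hmem := (PySem.Dict.contains_iff_mem_keys d (pvNm s)).mp hc
        rw [hkeys] at hmem
        simp [hmem] at h
      · exact (PySem.Dict.contains_iff_mem_keys d (pvNm s)).mpr
          (by rw [hkeys]; simpa using h)
    rw [pvNames_append]
    by_cases hmem : (pvNames pre).contains (pvNm s) = false
    · -- fresh name
      have hnotin : ∀ t ∈ pre, pvNm t ≠ pvNm s := by
        intro t ht he
        have hx : pvNm s ∈ pvNames pre := (pvNames_mem pre _).mpr ⟨t, ht, he⟩
        simp [hx] at hmem
      have hlong0 : pvLongest pre (pvNm s) = "" := pvLongest_not_mem pre _ hnotin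
      have hA : pvStepA d s = d.insert (pvNm s) (pvVl s) := by
        unfold pvStepA
        rw [show ((PySem.Dict.mk s).getD "string_name" "" : String) = pvNm s from rfl, hcontains]
        rw [if_pos hmem]
        rfl
      rw [hA, PySem.Dict.items_insert_of_not_contains d _ (by rw [hcontains]; exact hmem), ih,
        if_pos hmem, List.map_append]
      congr 1
      · apply List.map_congr_left
        intro n hn
        have hne : (pvNm s == n) = false := by
          simp only [beq_eq_false_iff_ne, ne_eq]
          intro he
          rw [← he] at hn
          simp [hn] at hmem
        rw [pvLongest_append, hne]
        simp
      · rw [List.map_singleton, pvLongest_append, hlong0]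
        by_cases hv : PySem.Str.len ("" : String) < PySem.Str.len (pvVl s)
        · rw [show (pvNm s == pvNm s) = true by simp]
          rw [if_pos (by simpa using hv)]
        · have hz : (pvVl s).length = 0 := by
            have hv' : ¬ ((("" : String).length : Int) < ((pvVl s).length : Int)) := by
              simpa [PySem.Str.len_eq] using hv
            have h0 : ("" : String).length = 0 := by decide
            omega
          have hve : pvVl s = "" := String.length_eq_zero_iff.mp hz
          rw [show (pvNm s == pvNm s) = true by simp]
          rw [if_neg (by simpa using hv), hve]
    · -- name already present
      have hmem' : pvNm s ∈ pvNames pre := by simpa using hmem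
      have hitem : (pvNm s, pvLongest pre (pvNm s)) ∈ d.items := by
        rw [ih]
        exact List.mem_map_of_mem hmem'
      have hgetd : d.getD (pvNm s) "" = pvLongest pre (pvNm s) :=
        PySem.Dict.getD_of_mem_items d hitem hnodup ""
      have hcont : d.contains (pvNm s) = true := by rw [hcontains]; simpa using hmem'
      rw [if_neg hmem]
      by_cases hlt : PySem.Str.len (pvLongest pre (pvNm s)) < PySem.Str.len (pvVl s)
      · have hA : pvStepA d s = d.insert (pvNm s) (pvVl s) := by
          unfold pvStepA
          rw [show ((PySem.Dict.mk s).getD "string_name" "" : String) = pvNm s from rfl, hcont]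
          rw [if_neg (by simp), hgetd]
          rw [show ((PySem.Dict.mk s).getD "string_value" "" : String) = pvVl s from rfl]
          rw [if_pos hlt]
        rw [hA, PySem.Dict.items_insert_of_contains d _ hcont, ih, List.map_map]
        apply List.map_congr_left
        intro n hn
        by_cases he : n = pvNm s
        · subst he
          rw [pvLongest_append]
          rw [show (pvNm s == pvNm s) = true by simp]
          rw [if_pos (by simpa using hlt)]
          simp
        · have h2 : (pvNm s == n) = false := by simpa using Ne.symm he
          rw [pvLongest_append]
          simp [he, h2]
      · have hA : pvStepA d s = d := by
          unfold pvStepA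
          rw [show ((PySem.Dict.mk s).getD "string_name" "" : String) = pvNm s from rfl, hcont]
          rw [if_neg (by simp), hgetd]
          rw [show ((PySem.Dict.mk s).getD "string_value" "" : String) = pvVl s from rfl]
          rw [if_neg hlt]
        rw [hA, ih]
        apply List.map_congr_left
        intro n hn
        rw [pvLongest_append]
        by_cases he : n = pvNm s
        · subst he
          rw [show (pvNm s == pvNm s) = true by simp]
          rw [if_neg (by simpa using hlt)]
        · have h2 : (pvNm s == n) = false := by simpa using Ne.symm he
          simp [h2]

-- ===== VERDICT (by name: the statement is the Claim_ definition above) =====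
theorem remove_duplicate_string_entries_spec : Claim_equal_remove_duplicate_string_entries := by
  intro string_entries _ _
  unfold Spec_remove_duplicate_string_entries
  unfold remove_duplicate_string_entries remove_duplicate_string_entries_alt
  set d := string_entries.foldl pvStepA PySem.Dict.empty with hd
  have hitems := pv_items_spec string_entries
  have hkeys : d.keys = pvNames string_entries := by
    have h0 : d.keys = d.items.map Prod.fst := rfl
    rw [h0, hitems, List.map_map]
    exact List.map_id'' (fun n => rfl) _
  have hnodup : d.keys.Nodup := by rw [hkeys]; exact pvNames_nodup string_entries
  rw [PySem.List.foldl_append_singleton_eq_map, List.nil_append, hkeys]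
  apply List.map_congr_left
  intro n hn
  have hgetd : d.getD n "" = pvLongest string_entries n := by
    apply PySem.Dict.getD_of_mem_items d _ hnodup
    rw [hitems]
    exact List.mem_map_of_mem hn
  rw [hgetd]
  rfl
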